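-- pv_equiv track=rewrite | github.com/choiseongjun/analysis_stock | utils/stock_ticker_extractor.py | get_ticker_category
-- ===== SOURCE A (Python) =====
-- def get_ticker_category(ticker: str) -> str:
--     """
--     티커의 카테고리 반환
--
--     Args:
--         ticker: 티커 심볼
--
--     Returns:
--         카테고리 문자열
--     """
--     categories = {
--         'Big Tech': ['AAPL', 'MSFT', 'GOOGL', 'GOOG', 'AMZN', 'META'],
--         'Semiconductors': ['NVDA', 'AMD', 'INTC', 'TSM', 'QCOM', 'MU', 'AVGO', 'ASML', 'ARM', 'AMAT', 'LRCX', 'KLAC'],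
--         'AI/Data': ['PLTR', 'AI', 'BBAI', 'SOUN', 'PATH'],
--         'Electric Vehicles': ['TSLA', 'RIVN', 'LCID', 'NIO', 'XPEV', 'LI'],
--         'Cloud/Software': ['CRM', 'ORCL', 'IBM', 'SAP', 'ADBE', 'NOW', 'SNOW', 'NET', 'DDOG', 'MDB', 'ESTC'],
--         'Fintech': ['SQ', 'PYPL', 'COIN', 'HOOD', 'SOFI'],
--         'Cybersecurity': ['CRWD', 'ZS', 'PANW', 'FTNT', 'S'],
--         'ETF': ['QQQ', 'SPY', 'VOO', 'VTI', 'ARKK', 'ARKQ', 'ARKW', 'ARKG'],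
--         'Gaming/Entertainment': ['RBLX', 'U', 'EA', 'TTWO', 'ATVI'],
--         'E-commerce/Marketplace': ['SHOP', 'MELI', 'SE'],
--     }
--
--     for category, tickers in categories.items():
--         if ticker in tickers:
--             return category
--
--     return 'Unknown/Startup'
-- ===== SOURCE B (Python) =====
-- """B: flat precomputed ticker->category map with a single dict lookup (idiomatic)."""
--
-- TICKER_TO_CATEGORY = {
--     'AAPL': 'Big Tech',
--     'MSFT': 'Big Tech',
--     'GOOGL': 'Big Tech',
--     'GOOG': 'Big Tech',
--     'AMZN': 'Big Tech',
--     'META': 'Big Tech',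
--     'NVDA': 'Semiconductors',
--     'AMD': 'Semiconductors',
--     'INTC': 'Semiconductors',
--     'TSM': 'Semiconductors',
--     'QCOM': 'Semiconductors',
--     'MU': 'Semiconductors',
--     'AVGO': 'Semiconductors',
--     'ASML': 'Semiconductors',
--     'ARM': 'Semiconductors',
--     'AMAT': 'Semiconductors',
--     'LRCX': 'Semiconductors',
--     'KLAC': 'Semiconductors',
--     'PLTR': 'AI/Data',
--     'AI': 'AI/Data',
--     'BBAI': 'AI/Data',
--     'SOUN': 'AI/Data',
--     'PATH': 'AI/Data',
--     'TSLA': 'Electric Vehicles',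
--     'RIVN': 'Electric Vehicles',
--     'LCID': 'Electric Vehicles',
--     'NIO': 'Electric Vehicles',
--     'XPEV': 'Electric Vehicles',
--     'LI': 'Electric Vehicles',
--     'CRM': 'Cloud/Software',
--     'ORCL': 'Cloud/Software',
--     'IBM': 'Cloud/Software',
--     'SAP': 'Cloud/Software',
--     'ADBE': 'Cloud/Software',
--     'NOW': 'Cloud/Software',
--     'SNOW': 'Cloud/Software',
--     'NET': 'Cloud/Software',
--     'DDOG': 'Cloud/Software',
--     'MDB': 'Cloud/Software',
--     'ESTC': 'Cloud/Software',
--     'SQ': 'Fintech',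
--     'PYPL': 'Fintech',
--     'COIN': 'Fintech',
--     'HOOD': 'Fintech',
--     'SOFI': 'Fintech',
--     'CRWD': 'Cybersecurity',
--     'ZS': 'Cybersecurity',
--     'PANW': 'Cybersecurity',
--     'FTNT': 'Cybersecurity',
--     'S': 'Cybersecurity',
--     'QQQ': 'ETF',
--     'SPY': 'ETF',
--     'VOO': 'ETF',
--     'VTI': 'ETF',
--     'ARKK': 'ETF',
--     'ARKQ': 'ETF',
--     'ARKW': 'ETF',
--     'ARKG': 'ETF',
--     'RBLX': 'Gaming/Entertainment',
--     'U': 'Gaming/Entertainment',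
--     'EA': 'Gaming/Entertainment',
--     'TTWO': 'Gaming/Entertainment',
--     'ATVI': 'Gaming/Entertainment',
--     'SHOP': 'E-commerce/Marketplace',
--     'MELI': 'E-commerce/Marketplace',
--     'SE': 'E-commerce/Marketplace',
-- }
--
--
-- def get_ticker_category(ticker: str) -> str:
--     """티커의 카테고리 반환"""
--     return TICKER_TO_CATEGORY.get(ticker, 'Unknown/Startup')
-- ===== Notes on version B (the rewrite author's own statement) =====
-- stated objective: idiomatic
-- what changed: Replaces the per-call scan over nested category lists with a flat precomputed ticker-to-category dictionary and a single .get lookup.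
import Mathlib
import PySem

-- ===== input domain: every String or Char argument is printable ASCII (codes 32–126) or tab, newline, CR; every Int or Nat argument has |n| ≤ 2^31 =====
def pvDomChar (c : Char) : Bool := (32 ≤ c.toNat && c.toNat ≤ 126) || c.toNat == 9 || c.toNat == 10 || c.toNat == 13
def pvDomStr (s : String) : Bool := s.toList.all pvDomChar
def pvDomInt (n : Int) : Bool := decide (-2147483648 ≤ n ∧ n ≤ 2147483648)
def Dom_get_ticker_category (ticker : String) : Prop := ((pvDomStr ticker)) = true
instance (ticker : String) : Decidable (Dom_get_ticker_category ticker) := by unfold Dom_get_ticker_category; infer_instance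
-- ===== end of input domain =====

-- B replaces A's per-call scan over nested category lists with a flat precomputed
-- ticker→category dictionary and a single .get lookup (idiomatic; same return value).

-- ===== PORT A =====
-- A's literal nested dict of category → ticker list
def pvCats : List (String × List String) :=
  [("Big Tech", ["AAPL", "MSFT", "GOOGL", "GOOG", "AMZN", "META"]),
   ("Semiconductors", ["NVDA", "AMD", "INTC", "TSM", "QCOM", "MU", "AVGO", "ASML", "ARM", "AMAT", "LRCX", "KLAC"]),
   ("AI/Data", ["PLTR", "AI", "BBAI", "SOUN", "PATH"]),
   ("Electric Vehicles", ["TSLA", "RIVN", "LCID", "NIO", "XPEV", "LI"]),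
   ("Cloud/Software", ["CRM", "ORCL", "IBM", "SAP", "ADBE", "NOW", "SNOW", "NET", "DDOG", "MDB", "ESTC"]),
   ("Fintech", ["SQ", "PYPL", "COIN", "HOOD", "SOFI"]),
   ("Cybersecurity", ["CRWD", "ZS", "PANW", "FTNT", "S"]),
   ("ETF", ["QQQ", "SPY", "VOO", "VTI", "ARKK", "ARKQ", "ARKW", "ARKG"]),
   ("Gaming/Entertainment", ["RBLX", "U", "EA", "TTWO", "ATVI"]),
   ("E-commerce/Marketplace", ["SHOP", "MELI", "SE"])]

-- the 'for category, tickers in categories.items(): if ticker in tickers: return category' loop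
def pvFindCat : List (String × List String) → String → String
  | [], _ => "Unknown/Startup"
  | (c, ts) :: rest, t => if ts.contains t then c else pvFindCat rest t

def get_ticker_category (ticker : String) : String :=
  pvFindCat pvCats ticker

-- ===== PORT B =====
-- B's flat literal dict TICKER_TO_CATEGORY
def pvFlat : PySem.Dict String String := PySem.Dict.mk
  [("AAPL", "Big Tech"),
   ("MSFT", "Big Tech"),
   ("GOOGL", "Big Tech"),
   ("GOOG", "Big Tech"),
   ("AMZN", "Big Tech"),
   ("META", "Big Tech"),
   ("NVDA", "Semiconductors"),
   ("AMD", "Semiconductors"),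
   ("INTC", "Semiconductors"),
   ("TSM", "Semiconductors"),
   ("QCOM", "Semiconductors"),
   ("MU", "Semiconductors"),
   ("AVGO", "Semiconductors"),
   ("ASML", "Semiconductors"),
   ("ARM", "Semiconductors"),
   ("AMAT", "Semiconductors"),
   ("LRCX", "Semiconductors"),
   ("KLAC", "Semiconductors"),
   ("PLTR", "AI/Data"),
   ("AI", "AI/Data"),
   ("BBAI", "AI/Data"),
   ("SOUN", "AI/Data"),
   ("PATH", "AI/Data"),
   ("TSLA", "Electric Vehicles"),
   ("RIVN", "Electric Vehicles"),
   ("LCID", "Electric Vehicles"),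
   ("NIO", "Electric Vehicles"),
   ("XPEV", "Electric Vehicles"),
   ("LI", "Electric Vehicles"),
   ("CRM", "Cloud/Software"),
   ("ORCL", "Cloud/Software"),
   ("IBM", "Cloud/Software"),
   ("SAP", "Cloud/Software"),
   ("ADBE", "Cloud/Software"),
   ("NOW", "Cloud/Software"),
   ("SNOW", "Cloud/Software"),
   ("NET", "Cloud/Software"),
   ("DDOG", "Cloud/Software"),
   ("MDB", "Cloud/Software"),
   ("ESTC", "Cloud/Software"),
   ("SQ", "Fintech"),
   ("PYPL", "Fintech"),
   ("COIN", "Fintech"),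
   ("HOOD", "Fintech"),
   ("SOFI", "Fintech"),
   ("CRWD", "Cybersecurity"),
   ("ZS", "Cybersecurity"),
   ("PANW", "Cybersecurity"),
   ("FTNT", "Cybersecurity"),
   ("S", "Cybersecurity"),
   ("QQQ", "ETF"),
   ("SPY", "ETF"),
   ("VOO", "ETF"),
   ("VTI", "ETF"),
   ("ARKK", "ETF"),
   ("ARKQ", "ETF"),
   ("ARKW", "ETF"),
   ("ARKG", "ETF"),
   ("RBLX", "Gaming/Entertainment"),
   ("U", "Gaming/Entertainment"),
   ("EA", "Gaming/Entertainment"),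
   ("TTWO", "Gaming/Entertainment"),
   ("ATVI", "Gaming/Entertainment"),
   ("SHOP", "E-commerce/Marketplace"),
   ("MELI", "E-commerce/Marketplace"),
   ("SE", "E-commerce/Marketplace")]

def get_ticker_category_alt (ticker : String) : String :=
  pvFlat.getD ticker "Unknown/Startup"

-- ===== PRECONDITION & SPEC =====
def Spec_get_ticker_category (ticker : String) (out : String) : Prop := out = get_ticker_category_alt ticker
instance (ticker : String) (out : String) : Decidable (Spec_get_ticker_category ticker out) := by unfold Spec_get_ticker_category; infer_instance

-- ===== CLAIM =====
def Claim_equal_get_ticker_category : Prop := ∀ (ticker : String), Dom_get_ticker_category ticker → Spec_get_ticker_category ticker (get_ticker_category ticker)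

-- ===== LEMMAS AND PROOFS =====

-- B's flat literal is exactly the flattening of A's nested dict (closed computation)
set_option maxRecDepth 10000 in
lemma pvFlat_eq : pvFlat = PySem.Dict.mk (pvCats.flatMap (fun p => p.2.map (fun t => (t, p.1)))) := by
  decide

-- lookup in one category's segment of the flat list
lemma get?_seg (ts : List String) (c : String) (rest : List (String × String)) (t : String) :
    (PySem.Dict.mk (ts.map (fun s => (s, c)) ++ rest)).get? t =
      if ts.contains t then some c else (PySem.Dict.mk rest).get? t := by
  induction ts with
  | nil => simp
  | cons x xs ih =>
    simp only [List.map_cons, List.cons_append, PySem.Dict.get?_mk_cons, List.contains_cons, ih]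
    rcases eq_or_ne t x with h | h
    · simp [h]
    · simp [beq_false_of_ne h, beq_false_of_ne (Ne.symm h)]

-- flat-list lookup computes A's first-matching-category scan
lemma get?_flat (cats : List (String × List String)) (t : String) :
    ((PySem.Dict.mk (cats.flatMap (fun p => p.2.map (fun s => (s, p.1))))).get? t).getD "Unknown/Startup"
      = pvFindCat cats t := by
  induction cats with
  | nil => simp [pvFindCat, PySem.Dict.get?]
  | cons p rest ih =>
    obtain ⟨c, ts⟩ := p
    simp only [List.flatMap_cons, pvFindCat, get?_seg]
    by_cases h : t ∈ ts
    · simp [h]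
    · simp [h, ih]

-- ===== VERDICT =====
theorem get_ticker_category_spec : Claim_equal_get_ticker_category := by
  intro ticker _
  unfold Spec_get_ticker_category get_ticker_category get_ticker_category_alt
  rw [pvFlat_eq, PySem.Dict.getD_eq_get?_getD, get?_flat]
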